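-- pv_equiv track=rewrite | github.com/DAAS69/job-trend-analyzer | app.py | are_skills_related
-- ===== SOURCE A (Python) =====
-- def are_skills_related(skill1: str, skill2: str) -> bool:
--     # Define related skill groups
--     skill_groups = [
--         {'javascript', 'react', 'html', 'css', 'nodejs'},
--         {'python', 'django', 'flask', 'machine learning', 'ai'},
--         {'java', 'spring', 'hibernate'},
--         {'docker', 'kubernetes', 'aws', 'devops'},
--     ]
--
--     for group in skill_groups:
--         if skill1.lower() in group and skill2.lower() in group:
--             return True
--     return False
-- ===== SOURCE B (Python) =====
-- _GROUPS = [
--     ['javascript', 'react', 'html', 'css', 'nodejs'],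
--     ['python', 'django', 'flask', 'machine learning', 'ai'],
--     ['java', 'spring', 'hibernate'],
--     ['docker', 'kubernetes', 'aws', 'devops'],
-- ]
--
-- # skill -> group index, built once
-- _IDX = {skill: i for i, group in enumerate(_GROUPS) for skill in group}
--
--
-- def are_skills_related(skill1: str, skill2: str) -> bool:
--     g1 = _IDX.get(skill1.lower())
--     if g1 is None:
--         return False
--     g2 = _IDX.get(skill2.lower())
--     if g2 is None:
--         return False
--     return g1 == g2
-- ===== Notes on version B (the rewrite author's own statement) =====
-- stated objective: simpler
-- what changed: Replaces the per-call scan over the four groups (two set-membership tests per group) by a precomputed skill-to-group-index map built once at module load; a call is just two lookups and an index comparison, with explicit None guards so unknown skills never compare equal.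
import Mathlib
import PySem

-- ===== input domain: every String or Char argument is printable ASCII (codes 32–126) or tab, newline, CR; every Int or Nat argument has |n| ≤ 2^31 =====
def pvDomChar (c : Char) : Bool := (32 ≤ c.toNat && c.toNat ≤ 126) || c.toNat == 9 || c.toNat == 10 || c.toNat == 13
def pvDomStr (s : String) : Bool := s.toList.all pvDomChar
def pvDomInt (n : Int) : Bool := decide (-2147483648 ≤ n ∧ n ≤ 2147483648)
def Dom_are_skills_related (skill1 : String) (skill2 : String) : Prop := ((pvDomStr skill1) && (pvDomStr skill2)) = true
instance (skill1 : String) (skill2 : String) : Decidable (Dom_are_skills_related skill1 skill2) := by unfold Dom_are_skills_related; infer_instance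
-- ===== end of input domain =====

-- B replaces A's per-call scan over the four skill groups by a skill -> group-index
-- map built once, so a call is two lookups and an index comparison (objective: simpler).

-- ===== PORT A =====
def are_skills_related (skill1 : String) (skill2 : String) : Bool :=
  let skill_groups : List (PySem.Set String) :=
    [PySem.Set.ofList ["javascript", "react", "html", "css", "nodejs"],
     PySem.Set.ofList ["python", "django", "flask", "machine learning", "ai"],
     PySem.Set.ofList ["java", "spring", "hibernate"],
     PySem.Set.ofList ["docker", "kubernetes", "aws", "devops"]]
  skill_groups.any (fun group =>
    PySem.Set.contains group (PySem.Str.lower skill1) &&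
    PySem.Set.contains group (PySem.Str.lower skill2))

-- ===== PORT B =====
def pvGroupsB : List (List String) :=
  [["javascript", "react", "html", "css", "nodejs"],
   ["python", "django", "flask", "machine learning", "ai"],
   ["java", "spring", "hibernate"],
   ["docker", "kubernetes", "aws", "devops"]]

-- {skill: i for i, group in enumerate(_GROUPS) for skill in group}
def pvIdx : PySem.Dict String Int :=
  (PySem.List.enumerate pvGroupsB).foldl
    (fun d ig => ig.2.foldl (fun d skill => d.insert skill ig.1) d) PySem.Dict.empty

def are_skills_related_alt (skill1 : String) (skill2 : String) : Bool :=
  match pvIdx.get? (PySem.Str.lower skill1) with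
  | none => false
  | some g1 =>
    match pvIdx.get? (PySem.Str.lower skill2) with
    | none => false
    | some g2 => g1 == g2

-- ===== PRECONDITION & SPEC =====
def Spec_are_skills_related (skill1 : String) (skill2 : String) (out : Bool) : Prop := out = are_skills_related_alt skill1 skill2
instance (skill1 : String) (skill2 : String) (out : Bool) : Decidable (Spec_are_skills_related skill1 skill2 out) := by unfold Spec_are_skills_related; infer_instance

-- ===== CLAIM (what is proved, stated in full; the proofs are below) =====
def Claim_equal_are_skills_related : Prop := ∀ (skill1 : String) (skill2 : String), Dom_are_skills_related skill1 skill2 → Spec_are_skills_related skill1 skill2 (are_skills_related skill1 skill2)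

-- ===== LEMMAS AND PROOFS =====

-- proof-side classification: the if-chain that pvIdx.get? unfolds to
def pvCls (s : String) : Option Int :=
  if "javascript" == s then some 0 else
  if "react" == s then some 0 else
  if "html" == s then some 0 else
  if "css" == s then some 0 else
  if "nodejs" == s then some 0 else
  if "python" == s then some 1 else
  if "django" == s then some 1 else
  if "flask" == s then some 1 else
  if "machine learning" == s then some 1 else
  if "ai" == s then some 1 else
  if "java" == s then some 2 else
  if "spring" == s then some 2 else
  if "hibernate" == s then some 2 else
  if "docker" == s then some 3 else
  if "kubernetes" == s then some 3 else
  if "aws" == s then some 3 else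
  if "devops" == s then some 3 else
  none

-- the index dict, evaluated to its association list
set_option maxHeartbeats 2000000 in
theorem pvIdx_eq : pvIdx = PySem.Dict.mk
  [("javascript", 0), ("react", 0), ("html", 0), ("css", 0), ("nodejs", 0),
   ("python", 1), ("django", 1), ("flask", 1), ("machine learning", 1), ("ai", 1),
   ("java", 2), ("spring", 2), ("hibernate", 2),
   ("docker", 3), ("kubernetes", 3), ("aws", 3), ("devops", 3)] := by decide

set_option maxHeartbeats 2000000 in
theorem get?_pvIdx (s : String) : pvIdx.get? s = pvCls s := by
  simp only [pvIdx_eq, PySem.Dict.get?_mk_cons, pvCls]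
  rfl

-- pvCls only produces indices 0..3
set_option maxHeartbeats 2000000 in
theorem pvCls_range (s : String) :
    pvCls s = none ∨ pvCls s = some 0 ∨ pvCls s = some 1 ∨ pvCls s = some 2 ∨ pvCls s = some 3 := by
  unfold pvCls
  by_cases h0 : ("javascript" == s) = true
  · rw [if_pos h0]; decide
  rw [if_neg h0]
  by_cases h1 : ("react" == s) = true
  · rw [if_pos h1]; decide
  rw [if_neg h1]
  by_cases h2 : ("html" == s) = true
  · rw [if_pos h2]; decide
  rw [if_neg h2]
  by_cases h3 : ("css" == s) = true
  · rw [if_pos h3]; decide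
  rw [if_neg h3]
  by_cases h4 : ("nodejs" == s) = true
  · rw [if_pos h4]; decide
  rw [if_neg h4]
  by_cases h5 : ("python" == s) = true
  · rw [if_pos h5]; decide
  rw [if_neg h5]
  by_cases h6 : ("django" == s) = true
  · rw [if_pos h6]; decide
  rw [if_neg h6]
  by_cases h7 : ("flask" == s) = true
  · rw [if_pos h7]; decide
  rw [if_neg h7]
  by_cases h8 : ("machine learning" == s) = true
  · rw [if_pos h8]; decide
  rw [if_neg h8]
  by_cases h9 : ("ai" == s) = true
  · rw [if_pos h9]; decide
  rw [if_neg h9]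
  by_cases h10 : ("java" == s) = true
  · rw [if_pos h10]; decide
  rw [if_neg h10]
  by_cases h11 : ("spring" == s) = true
  · rw [if_pos h11]; decide
  rw [if_neg h11]
  by_cases h12 : ("hibernate" == s) = true
  · rw [if_pos h12]; decide
  rw [if_neg h12]
  by_cases h13 : ("docker" == s) = true
  · rw [if_pos h13]; decide
  rw [if_neg h13]
  by_cases h14 : ("kubernetes" == s) = true
  · rw [if_pos h14]; decide
  rw [if_neg h14]
  by_cases h15 : ("aws" == s) = true
  · rw [if_pos h15]; decide
  rw [if_neg h15]
  by_cases h16 : ("devops" == s) = true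
  · rw [if_pos h16]; decide
  rw [if_neg h16]
  left; rfl

-- each group's membership test equals "pvCls sends s to that group's index"
set_option maxHeartbeats 4000000 in
theorem contains_groups (s : String) :
    PySem.Set.contains (PySem.Set.ofList ["javascript", "react", "html", "css", "nodejs"]) s = (pvCls s == some 0) ∧
    PySem.Set.contains (PySem.Set.ofList ["python", "django", "flask", "machine learning", "ai"]) s = (pvCls s == some 1) ∧
    PySem.Set.contains (PySem.Set.ofList ["java", "spring", "hibernate"]) s = (pvCls s == some 2) ∧
    PySem.Set.contains (PySem.Set.ofList ["docker", "kubernetes", "aws", "devops"]) s = (pvCls s == some 3) := by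
  have hof0 : PySem.Set.ofList ["javascript", "react", "html", "css", "nodejs"] = ["javascript", "react", "html", "css", "nodejs"] := by decide
  have hof1 : PySem.Set.ofList ["python", "django", "flask", "machine learning", "ai"] = ["python", "django", "flask", "machine learning", "ai"] := by decide
  have hof2 : PySem.Set.ofList ["java", "spring", "hibernate"] = ["java", "spring", "hibernate"] := by decide
  have hof3 : PySem.Set.ofList ["docker", "kubernetes", "aws", "devops"] = ["docker", "kubernetes", "aws", "devops"] := by decide
  rw [hof0, hof1, hof2, hof3]
  by_cases h0 : ("javascript" == s) = true
  · rcases eq_of_beq h0 with rfl; decide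
  by_cases h1 : ("react" == s) = true
  · rcases eq_of_beq h1 with rfl; decide
  by_cases h2 : ("html" == s) = true
  · rcases eq_of_beq h2 with rfl; decide
  by_cases h3 : ("css" == s) = true
  · rcases eq_of_beq h3 with rfl; decide
  by_cases h4 : ("nodejs" == s) = true
  · rcases eq_of_beq h4 with rfl; decide
  by_cases h5 : ("python" == s) = true
  · rcases eq_of_beq h5 with rfl; decide
  by_cases h6 : ("django" == s) = true
  · rcases eq_of_beq h6 with rfl; decide
  by_cases h7 : ("flask" == s) = true
  · rcases eq_of_beq h7 with rfl; decide
  by_cases h8 : ("machine learning" == s) = true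
  · rcases eq_of_beq h8 with rfl; decide
  by_cases h9 : ("ai" == s) = true
  · rcases eq_of_beq h9 with rfl; decide
  by_cases h10 : ("java" == s) = true
  · rcases eq_of_beq h10 with rfl; decide
  by_cases h11 : ("spring" == s) = true
  · rcases eq_of_beq h11 with rfl; decide
  by_cases h12 : ("hibernate" == s) = true
  · rcases eq_of_beq h12 with rfl; decide
  by_cases h13 : ("docker" == s) = true
  · rcases eq_of_beq h13 with rfl; decide
  by_cases h14 : ("kubernetes" == s) = true
  · rcases eq_of_beq h14 with rfl; decide
  by_cases h15 : ("aws" == s) = true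
  · rcases eq_of_beq h15 with rfl; decide
  by_cases h16 : ("devops" == s) = true
  · rcases eq_of_beq h16 with rfl; decide
  simp only [Bool.not_eq_true] at h0 h1 h2 h3 h4 h5 h6 h7 h8 h9 h10 h11 h12 h13 h14 h15 h16
  have h0' : (s == "javascript") = false := by
    cases hb : s == "javascript"
    · rfl
    · rcases eq_of_beq hb with rfl; exact absurd h0 (by decide)
  have h1' : (s == "react") = false := by
    cases hb : s == "react"
    · rfl
    · rcases eq_of_beq hb with rfl; exact absurd h1 (by decide)
  have h2' : (s == "html") = false := by
    cases hb : s == "html"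
    · rfl
    · rcases eq_of_beq hb with rfl; exact absurd h2 (by decide)
  have h3' : (s == "css") = false := by
    cases hb : s == "css"
    · rfl
    · rcases eq_of_beq hb with rfl; exact absurd h3 (by decide)
  have h4' : (s == "nodejs") = false := by
    cases hb : s == "nodejs"
    · rfl
    · rcases eq_of_beq hb with rfl; exact absurd h4 (by decide)
  have h5' : (s == "python") = false := by
    cases hb : s == "python"
    · rfl
    · rcases eq_of_beq hb with rfl; exact absurd h5 (by decide)
  have h6' : (s == "django") = false := by
    cases hb : s == "django"
    · rfl
    · rcases eq_of_beq hb with rfl; exact absurd h6 (by decide)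
  have h7' : (s == "flask") = false := by
    cases hb : s == "flask"
    · rfl
    · rcases eq_of_beq hb with rfl; exact absurd h7 (by decide)
  have h8' : (s == "machine learning") = false := by
    cases hb : s == "machine learning"
    · rfl
    · rcases eq_of_beq hb with rfl; exact absurd h8 (by decide)
  have h9' : (s == "ai") = false := by
    cases hb : s == "ai"
    · rfl
    · rcases eq_of_beq hb with rfl; exact absurd h9 (by decide)
  have h10' : (s == "java") = false := by
    cases hb : s == "java"
    · rfl
    · rcases eq_of_beq hb with rfl; exact absurd h10 (by decide)
  have h11' : (s == "spring") = false := by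
    cases hb : s == "spring"
    · rfl
    · rcases eq_of_beq hb with rfl; exact absurd h11 (by decide)
  have h12' : (s == "hibernate") = false := by
    cases hb : s == "hibernate"
    · rfl
    · rcases eq_of_beq hb with rfl; exact absurd h12 (by decide)
  have h13' : (s == "docker") = false := by
    cases hb : s == "docker"
    · rfl
    · rcases eq_of_beq hb with rfl; exact absurd h13 (by decide)
  have h14' : (s == "kubernetes") = false := by
    cases hb : s == "kubernetes"
    · rfl
    · rcases eq_of_beq hb with rfl; exact absurd h14 (by decide)
  have h15' : (s == "aws") = false := by
    cases hb : s == "aws"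
    · rfl
    · rcases eq_of_beq hb with rfl; exact absurd h15 (by decide)
  have h16' : (s == "devops") = false := by
    cases hb : s == "devops"
    · rfl
    · rcases eq_of_beq hb with rfl; exact absurd h16 (by decide)
  simp only [pvCls, PySem.Set.contains_eq_listContains, List.contains_cons,
    h0, h1, h2, h3, h4, h5, h6, h7, h8, h9, h10, h11, h12, h13, h14, h15, h16,
    h0', h1', h2', h3', h4', h5', h6', h7', h8', h9', h10', h11', h12', h13', h14', h15', h16',
    List.contains_nil, Bool.false_eq_true, if_false, Bool.or_false, Bool.false_or, Bool.or_self]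
  exact ⟨rfl, rfl, rfl, rfl⟩

-- ===== VERDICT (by name: the statement is the Claim_ definition above) =====
theorem are_skills_related_spec : Claim_equal_are_skills_related := by
  intro skill1 skill2 _
  unfold Spec_are_skills_related are_skills_related are_skills_related_alt
  obtain ⟨a0, a1, a2, a3⟩ := contains_groups (PySem.Str.lower skill1)
  obtain ⟨b0, b1, b2, b3⟩ := contains_groups (PySem.Str.lower skill2)
  simp only [List.any_cons, List.any_nil, a0, a1, a2, a3, b0, b1, b2, b3, get?_pvIdx]
  rcases pvCls_range (PySem.Str.lower skill1) with h1 | h1 | h1 | h1 | h1 <;>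
    rcases pvCls_range (PySem.Str.lower skill2) with h2 | h2 | h2 | h2 | h2 <;>
    rw [h1, h2] <;> rfl
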